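-- pv_equiv track=rewrite | github.com/meyer-lab-cshl/copepodTCR | copepodTCR/functions.py | find_possible_k_values
-- ===== SOURCE A (Python) =====
-- def factorial(num):
--
--     """
--     Returns factorial of the number.
--     Used in function(combination).
--     """
--
--     if num == 0:
--         return 1
--     else:
--         return num * factorial(num-1)
--
-- def combination(n, k):
--
--     """
--     Returns number of possible combinations.
--     Is dependent on function(factorial)
--     Used in function(find_possible_k_values).
--     """
--
--     return factorial(n) // (factorial(k) * factorial(n - k))
--
-- def find_possible_k_values(n, l):
--
--     """
--     Returns possible iters given number of peptides (l) and number of pools (n).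
--     Is dependent on function(combination).
--     """
--
--     k_values = []
--     k = 0
--
--     while k <= n:
--         c = combination(n, k)
--         if c >= l:
--             break
--         k += 1
--
--     while k <= n:
--         if combination(n, k) >= l:
--             k_values.append(k)
--         else:
--             break
--         k += 1
--
--     return k_values
-- ===== SOURCE B (Python) =====
-- def find_possible_k_values(n, l):
--     k_values = []
--     c = 1  # C(n, 0), updated incrementally: C(n, k+1) = C(n, k) * (n - k) // (k + 1)
--     started = False
--     k = 0
--     while k <= n:
--         if c >= l:
--             started = True
--             k_values.append(k)
--         elif started:
--             break
--         c = c * (n - k) // (k + 1)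
--         k += 1
--     return k_values
-- ===== Notes on version B (the rewrite author's own statement) =====
-- stated objective: faster
-- what changed: Replaces the two factorial-recomputing scans with a single pass that maintains C(n,k) incrementally via C(n,k+1)=C(n,k)*(n-k)//(k+1) and a 'started' flag reproducing A's break logic; Pre_ excludes only n>=996, where A's recursive factorial raises RecursionError.
import Mathlib
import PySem

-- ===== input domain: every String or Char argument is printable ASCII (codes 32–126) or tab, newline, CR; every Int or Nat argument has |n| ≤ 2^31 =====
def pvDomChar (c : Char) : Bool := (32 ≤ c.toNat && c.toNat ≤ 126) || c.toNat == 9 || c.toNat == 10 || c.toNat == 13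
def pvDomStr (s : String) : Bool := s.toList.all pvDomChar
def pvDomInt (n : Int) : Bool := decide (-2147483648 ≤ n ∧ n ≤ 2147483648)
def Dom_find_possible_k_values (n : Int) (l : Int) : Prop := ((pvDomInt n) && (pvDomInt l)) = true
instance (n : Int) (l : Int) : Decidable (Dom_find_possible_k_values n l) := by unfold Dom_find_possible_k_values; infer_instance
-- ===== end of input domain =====

-- B replaces A's factorial-based combination recomputed at every k by a single pass that
-- maintains C(n,k) incrementally (C(n,k+1) = C(n,k)*(n-k)//(k+1)) with a 'started' flag.


-- ===== PORT A =====
-- Python's factorial recurses on num == 0; it is only ever called with num ≥ 0,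
-- where this guard (num ≤ 0) agrees with it; the guard only makes the recursion total.
def pyFact (num : Int) : Int :=
  if _h : num ≤ 0 then 1 else num * pyFact (num - 1)
termination_by num.toNat
decreasing_by omega

def pyComb (n k : Int) : Int :=
  PySem.Int.floordiv (pyFact n) (pyFact k * pyFact (n - k))

-- first while loop of A: advance k until combination(n,k) >= l or k > n; returns final k
def loopA1 (n l k : Int) : Int :=
  if _h : k ≤ n then
    if l ≤ pyComb n k then k else loopA1 n l (k + 1)
  else k
termination_by (n + 1 - k).toNat
decreasing_by omega

-- second while loop of A: append k while combination(n,k) >= l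
def loopA2 (n l k : Int) : List Int :=
  if _h : k ≤ n then
    if l ≤ pyComb n k then k :: loopA2 n l (k + 1) else []
  else []
termination_by (n + 1 - k).toNat
decreasing_by omega

def find_possible_k_values (n : Int) (l : Int) : List Int :=
  loopA2 n l (loopA1 n l 0)

-- ===== PORT B =====
-- single pass of Source B: c carries the incrementally updated coefficient
def loopB (n l k c : Int) (started : Bool) : List Int :=
  if _h : k ≤ n then
    if l ≤ c then
      k :: loopB n l (k + 1) (PySem.Int.floordiv (c * (n - k)) (k + 1)) true
    else if started then []
    else loopB n l (k + 1) (PySem.Int.floordiv (c * (n - k)) (k + 1)) false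
  else []
termination_by (n + 1 - k).toNat
decreasing_by all_goals omega

def find_possible_k_values_alt (n : Int) (l : Int) : List Int :=
  loopB n l 0 1 false

-- ===== PRECONDITION & SPEC =====
-- Pre_ excludes only n ≥ 996, where Python A RAISES RecursionError: its recursive
-- factorial(n) exceeds CPython's default recursion limit (1000), so A returns no value there.
def Pre_find_possible_k_values (n : Int) (l : Int) : Prop := n ≤ 995
instance (n : Int) (l : Int) : Decidable (Pre_find_possible_k_values n l) := by unfold Pre_find_possible_k_values; infer_instance
def pvWitness_find_possible_k_values : Int × Int := (5, 3)

def Spec_find_possible_k_values (n : Int) (l : Int) (out : List Int) : Prop := out = find_possible_k_values_alt n l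
instance (n : Int) (l : Int) (out : List Int) : Decidable (Spec_find_possible_k_values n l out) := by unfold Spec_find_possible_k_values; infer_instance

-- ===== CLAIM (what is proved, stated in full; the proofs are below) =====
def Claim_equal_find_possible_k_values : Prop := ∀ (n : Int) (l : Int), Dom_find_possible_k_values n l → Pre_find_possible_k_values n l → Spec_find_possible_k_values n l (find_possible_k_values n l)

-- ===== LEMMAS AND PROOFS =====

theorem pyFact_eq (m : Int) : pyFact m = (Nat.factorial m.toNat : Int) := by
  fun_induction pyFact with
  | case1 m h =>
    have : m.toNat = 0 := by omega
    simp [this]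
  | case2 m h ih =>
    have h1 : m.toNat = (m - 1).toNat + 1 := by omega
    rw [ih, h1, Nat.factorial_succ]
    have h2 : ((m - 1).toNat : Int) = m - 1 := by omega
    push_cast
    rw [h2]; ring

theorem pyComb_eq (n k : Int) (h0 : 0 ≤ k) (h1 : k ≤ n) :
    pyComb n k = (n.toNat.choose k.toNat : Int) := by
  unfold pyComb
  rw [pyFact_eq, pyFact_eq, pyFact_eq]
  have hnk : (n - k).toNat = n.toNat - k.toNat := by omega
  have hkn : k.toNat ≤ n.toNat := by omega
  rw [hnk]
  have hmul : (Nat.factorial k.toNat : Int) * (Nat.factorial (n.toNat - k.toNat) : Int)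
      = ((Nat.factorial k.toNat * Nat.factorial (n.toNat - k.toNat) : Nat) : Int) := by push_cast; ring
  rw [hmul, PySem.Int.floordiv_natCast]
  rw [Nat.choose_eq_factorial_div_factorial hkn]

theorem pyComb_zero (n : Int) (hn : 0 ≤ n) : pyComb n 0 = 1 := by
  rw [pyComb_eq n 0 le_rfl hn]; simp

theorem pyComb_step (n k : Int) (h0 : 0 ≤ k) (h1 : k < n) :
    PySem.Int.floordiv (pyComb n k * (n - k)) (k + 1) = pyComb n (k + 1) := by
  rw [pyComb_eq n k h0 (le_of_lt h1), pyComb_eq n (k + 1) (by omega) (by omega)]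
  have hnk : (n - k : Int) = ((n.toNat - k.toNat : Nat) : Int) := by omega
  have hk1 : (k + 1 : Int) = ((k.toNat + 1 : Nat) : Int) := by omega
  have hk1' : ((k.toNat + 1 : Nat) : Int).toNat = k.toNat + 1 := by omega
  rw [hnk, hk1, hk1']
  have hmul : (n.toNat.choose k.toNat : Int) * ((n.toNat - k.toNat : Nat) : Int)
      = ((n.toNat.choose k.toNat * (n.toNat - k.toNat) : Nat) : Int) := by push_cast; ring
  rw [hmul, PySem.Int.floordiv_natCast]
  rw [← Nat.choose_succ_right_eq, Nat.mul_div_cancel _ (Nat.succ_pos _)]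

theorem loopB_true (n l : Int) (m : Nat) :
    ∀ (k c : Int), (n + 1 - k).toNat ≤ m → 0 ≤ k → (k ≤ n → c = pyComb n k) →
      loopB n l k c true = loopA2 n l k := by
  induction m with
  | zero =>
    intro k c hm hk hc
    have hkn : ¬ k ≤ n := by omega
    rw [loopB, loopA2]; simp [hkn]
  | succ m ih =>
    intro k c hm hk hc
    by_cases hkn : k ≤ n
    · have hc' := hc hkn
      subst hc'
      rw [loopB, loopA2]
      by_cases hl : l ≤ pyComb n k
      · simp only [hkn, hl, dif_pos, if_pos, List.cons.injEq, true_and]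
        exact ih (k + 1) _ (by omega) (by omega)
          (fun hk1 => pyComb_step n k hk (by omega))
      · simp [hkn, hl]
    · rw [loopB, loopA2]; simp [hkn]

theorem loopB_false (n l : Int) (m : Nat) :
    ∀ (k c : Int), (n + 1 - k).toNat ≤ m → 0 ≤ k → (k ≤ n → c = pyComb n k) →
      loopB n l k c false = loopA2 n l (loopA1 n l k) := by
  induction m with
  | zero =>
    intro k c hm hk hc
    have hkn : ¬ k ≤ n := by omega
    rw [loopB, loopA1, loopA2]; simp [hkn]
  | succ m ih =>
    intro k c hm hk hc
    by_cases hkn : k ≤ n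
    · have hc' := hc hkn
      subst hc'
      by_cases hl : l ≤ pyComb n k
      · rw [loopB, loopA1]
        simp only [hkn, hl, dif_pos, if_pos]
        rw [loopA2]
        simp only [hkn, hl, dif_pos, if_pos, List.cons.injEq, true_and]
        exact loopB_true n l m (k + 1) _ (by omega) (by omega)
          (fun hk1 => pyComb_step n k hk (by omega))
      · rw [loopB, loopA1]
        simp only [hkn, hl, dif_pos, if_neg, not_false_iff, Bool.false_eq_true]
        exact ih (k + 1) _ (by omega) (by omega)
          (fun hk1 => pyComb_step n k hk (by omega))
    · rw [loopB, loopA1, loopA2]; simp [hkn]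

-- ===== VERDICT (by name: the statement is the Claim_ definition above) =====
theorem find_possible_k_values_spec : Claim_equal_find_possible_k_values := by
  intro n l _ _
  unfold Spec_find_possible_k_values find_possible_k_values find_possible_k_values_alt
  exact (loopB_false n l (n + 1).toNat 0 1 (by omega) le_rfl
    (fun hn => (pyComb_zero n hn).symm)).symm
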